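-- pv_equiv track=rewrite | github.com/elbuco1/AttentionMechanismsTrajectoryPrediction | src/models/datasets/datasets.py | __augmented_ids_repetition
-- ===== SOURCE A (Python) =====
-- def __augmented_ids_repetition(augmented_ids ):
--       unique_ids = []
--       nb_ids = []
--       for id_ in augmented_ids:
--             if id_ not in unique_ids:
--                   unique_ids.append(id_)
--                   nb_ids.append(0)
--             nb_ids[-1] += 1
--       return unique_ids,nb_ids
-- ===== SOURCE B (Python) =====
-- def __augmented_ids_repetition(augmented_ids):
--     augmented_ids = list(augmented_ids)
--     seen = set()
--     unique_ids = []
--     bounds = []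
--     for i, id_ in enumerate(augmented_ids):
--         if id_ not in seen:
--             seen.add(id_)
--             unique_ids.append(id_)
--             bounds.append(i)
--     bounds.append(len(augmented_ids))
--     nb_ids = [b - a for a, b in zip(bounds, bounds[1:])]
--     return unique_ids, nb_ids
-- ===== Notes on version B (the rewrite author's own statement) =====
-- stated objective: faster
-- what changed: B replaces A's quadratic list-membership loop with an incremental last-element counter by a single pass that records boundary indices of first occurrences in a seen set, then derives the counts as consecutive differences of the boundary list (with len appended) via a zip comprehension.
import Mathlib
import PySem

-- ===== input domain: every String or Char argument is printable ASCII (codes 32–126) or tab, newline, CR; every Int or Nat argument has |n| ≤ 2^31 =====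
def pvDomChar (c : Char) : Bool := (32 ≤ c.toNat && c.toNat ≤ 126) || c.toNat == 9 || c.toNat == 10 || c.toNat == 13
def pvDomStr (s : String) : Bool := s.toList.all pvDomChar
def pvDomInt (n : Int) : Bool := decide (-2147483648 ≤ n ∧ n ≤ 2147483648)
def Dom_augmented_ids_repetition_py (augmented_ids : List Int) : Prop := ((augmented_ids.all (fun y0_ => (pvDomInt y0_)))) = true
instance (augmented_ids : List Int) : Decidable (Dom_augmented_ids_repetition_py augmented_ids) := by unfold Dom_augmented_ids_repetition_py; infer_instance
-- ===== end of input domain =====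

-- B replaces A's incremental last-counter with boundary indices recorded via a `seen` set,
-- recovering the per-group counts as consecutive differences (objective: alternative decomposition).

-- ===== PORT A =====
-- loop body of A: membership test / append, then increment of the last count
def pvStepA (st : List Int × List Int) (id_ : Int) : List Int × List Int :=
  let st := if id_ ∈ st.1 then st else (st.1 ++ [id_], st.2 ++ [0])
  (st.1, st.2.dropLast ++ [st.2.getLastD 0 + 1])

def augmented_ids_repetition_py (augmented_ids : List Int) : List Int × List Int :=
  augmented_ids.foldl pvStepA ([], [])

-- ===== PORT B =====
-- loop body of B: `if id_ not in seen: seen.add(id_); unique_ids.append(id_); bounds.append(i)`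
def pvStepB (st : PySem.Set Int × List Int × List Int) (p : Int × Int) :
    PySem.Set Int × List Int × List Int :=
  if p.2 ∈ st.1 then st else (PySem.Set.add st.1 p.2, st.2.1 ++ [p.2], st.2.2 ++ [p.1])

def augmented_ids_repetition_py_alt (augmented_ids : List Int) : List Int × List Int :=
  let st := (PySem.List.enumerate augmented_ids 0).foldl pvStepB (PySem.Set.empty, [], [])
  let bounds := st.2.2 ++ [(augmented_ids.length : Int)]
  (st.2.1, (bounds.zip (bounds.drop 1)).map (fun q => q.2 - q.1))

-- ===== PRECONDITION & SPEC =====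
def Spec_augmented_ids_repetition_py (augmented_ids : List Int) (out : List Int × List Int) : Prop := out = augmented_ids_repetition_py_alt augmented_ids
instance (augmented_ids : List Int) (out : List Int × List Int) : Decidable (Spec_augmented_ids_repetition_py augmented_ids out) := by unfold Spec_augmented_ids_repetition_py; infer_instance

-- ===== CLAIM (what is proved, stated in full; the proofs are below) =====
def Claim_equal_augmented_ids_repetition_py : Prop := ∀ (augmented_ids : List Int), Dom_augmented_ids_repetition_py augmented_ids → Spec_augmented_ids_repetition_py augmented_ids (augmented_ids_repetition_py augmented_ids)

-- ===== LEMMAS AND PROOFS =====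

-- consecutive differences, recursively (proof-side view of B's zip/map comprehension)
def pvZd : List Int → List Int
  | a :: b :: t => (b - a) :: pvZd (b :: t)
  | _ => []

lemma pvZd_eq (l : List Int) :
    ((l.zip (l.drop 1)).map (fun q => q.2 - q.1)) = pvZd l := by
  induction l with
  | nil => rfl
  | cons x l ih =>
    cases l with
    | nil => rfl
    | cons y t => simpa [pvZd] using ih

lemma pvZd_snoc (l : List Int) (c a : Int) :
    pvZd (l ++ [c, a]) = pvZd (l ++ [c]) ++ [a - c] := by
  induction l with
  | nil => simp [pvZd]
  | cons x l ih =>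
    cases l with
    | nil => simp [pvZd]
    | cons y t => simpa [pvZd] using ih

lemma pvIncLast (m : List Int) (v : Int) :
    (m ++ [v]).dropLast ++ [(m ++ [v]).getLastD 0 + 1] = m ++ [v + 1] := by
  simp

lemma pv_inv (rest : List Int) :
    ∀ (seen u b nb : List Int) (k : Int),
      (∀ x, x ∈ seen ↔ x ∈ u) → (b = [] ↔ u = []) → nb = pvZd (b ++ [k]) →
      rest.foldl pvStepA (u, nb)
        = (((PySem.List.enumerate rest k).foldl pvStepB (seen, u, b)).2.1,
           pvZd (((PySem.List.enumerate rest k).foldl pvStepB (seen, u, b)).2.2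
                 ++ [k + rest.length])) := by
  induction rest with
  | nil =>
    intro seen u b nb k hseen hb hnb
    simp [PySem.List.enumerate, hnb]
  | cons x t ih =>
    intro seen u b nb k hseen hb hnb
    rw [PySem.List.enumerate_cons]
    by_cases hx : x ∈ u
    · have hxs : x ∈ seen := (hseen x).mpr hx
      have hu : u ≠ [] := by intro h; simp [h] at hx
      obtain hbe | ⟨b', c, rfl⟩ := b.eq_nil_or_concat
      · exact absurd (hb.mp hbe) hu
      simp only [List.concat_eq_append] at hb hnb ⊢
      have hnb' : nb.dropLast ++ [nb.getLastD 0 + 1] = pvZd ((b' ++ [c]) ++ [k + 1]) := by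
        have h1 : nb = pvZd (b' ++ [c]) ++ [k - c] := by
          rw [hnb]; simpa using pvZd_snoc b' c k
        have h2 : pvZd ((b' ++ [c]) ++ [k + 1]) = pvZd (b' ++ [c]) ++ [(k + 1) - c] := by
          simpa using pvZd_snoc b' c (k + 1)
        rw [h1, h2, pvIncLast]
        congr 2
        ring
      have hstepA : pvStepA (u, nb) x = (u, nb.dropLast ++ [nb.getLastD 0 + 1]) := by
        simp [pvStepA, hx]
      have hstepB : pvStepB (seen, u, b' ++ [c]) (k, x) = (seen, u, b' ++ [c]) := by
        simp [pvStepB, hxs]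
      rw [List.foldl_cons, List.foldl_cons, hstepA, hstepB,
        ih seen u (b' ++ [c]) _ (k + 1) hseen hb hnb']
      congr 3
      simp only [List.length_cons]
      push_cast
      ring_nf
    · have hxs : x ∉ seen := fun h => hx ((hseen x).mp h)
      have hstepA : pvStepA (u, nb) x = (u ++ [x], nb ++ [1]) := by
        simp only [pvStepA, if_neg hx]
        exact congrArg _ (by simpa using pvIncLast nb 0)
      have hstepB : pvStepB (seen, u, b) (k, x)
          = (PySem.Set.add seen x, u ++ [x], b ++ [k]) := by
        simp [pvStepB, hxs]
      have hseen' : ∀ y, y ∈ PySem.Set.add seen x ↔ y ∈ u ++ [x] := by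
        intro y
        simp [PySem.Set.mem_add, hseen y]
      have hb' : b ++ [k] = [] ↔ u ++ [x] = [] := by simp
      have hnb' : nb ++ [1] = pvZd ((b ++ [k]) ++ [k + 1]) := by
        have := pvZd_snoc b k (k + 1)
        simp only [show k + 1 - k = 1 by ring] at this
        rw [show (b ++ [k]) ++ [k+1] = b ++ [k, k+1] by simp, this, hnb]
      rw [List.foldl_cons, List.foldl_cons, hstepA, hstepB,
        ih _ _ _ _ (k + 1) hseen' hb' hnb']
      congr 3
      simp only [List.length_cons]
      push_cast
      ring_nf

-- ===== VERDICT (by name: the statement is the Claim_ definition above) =====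
theorem augmented_ids_repetition_py_spec : Claim_equal_augmented_ids_repetition_py := by
  intro l _
  unfold Spec_augmented_ids_repetition_py
  have h := pv_inv l [] [] [] [] 0 (by simp) (by simp) (by simp [pvZd])
  simp only [augmented_ids_repetition_py, augmented_ids_repetition_py_alt, pvZd_eq]
  simpa using h
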